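-- pv_equiv track=rewrite | github.com/2005Maverick/eccv- | src/generators/spatial_generator.py | _pick_two_distinct
-- ===== SOURCE A (Python) =====
-- def _pick_two_distinct(detections):
--     seen = {}
--     for d in detections:
--         label = d.get("label", "")
--         if label and label not in seen:
--             seen[label] = d
--         if len(seen) >= 2:
--             break
--     if len(seen) < 2:
--         return None, None
--     items = list(seen.values())
--     return items[0], items[1]
-- ===== SOURCE B (Python) =====
-- def _pick_two_distinct(detections):
--     labeled = [(d.get("label", ""), d) for d in detections]
--     labeled = [(l, d) for (l, d) in labeled if l]
--     if not labeled:
--         return None, None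
--     first_label, first = labeled[0]
--     rest = [d for (l, d) in labeled if l != first_label]
--     if not rest:
--         return None, None
--     return first, rest[0]
-- ===== Notes on version B (the rewrite author's own statement) =====
-- stated objective: alternative
-- what changed: Replaces A's single pass that grows an ordered dict with a break/len check by a staged pipeline: first materialise the list of (label, detection) pairs with non-empty labels, take its head as the first pick, then a second comprehension collects the detections whose label differs from the first and its head is the second pick.
import Mathlib
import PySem

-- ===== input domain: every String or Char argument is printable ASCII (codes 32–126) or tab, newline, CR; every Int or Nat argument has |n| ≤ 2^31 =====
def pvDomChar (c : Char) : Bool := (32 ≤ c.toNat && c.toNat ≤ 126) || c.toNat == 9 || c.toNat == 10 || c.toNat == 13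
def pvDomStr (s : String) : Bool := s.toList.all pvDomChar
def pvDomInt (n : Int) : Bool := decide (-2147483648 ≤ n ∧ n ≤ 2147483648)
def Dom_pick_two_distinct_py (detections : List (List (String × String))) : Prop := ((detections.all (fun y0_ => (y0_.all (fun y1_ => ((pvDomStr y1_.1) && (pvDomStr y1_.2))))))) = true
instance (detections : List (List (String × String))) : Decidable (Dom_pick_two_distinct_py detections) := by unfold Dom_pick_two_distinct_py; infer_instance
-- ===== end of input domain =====

-- B replaces A's dict-growing break loop by a staged pipeline: filter the labeled pairs, take the head, filter the differing labels, take that head.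

-- ===== PORT A =====
-- after the loop: `if len(seen) < 2: return None, None; items = list(seen.values()); return items[0], items[1]`
-- (a values list of length < 2 is exactly `len(seen) < 2`, so the match covers both lines)
def pickTwoFinishA (seen : PySem.Dict String (List (String × String))) :
    (Option (List (String × String))) × (Option (List (String × String))) :=
  match seen.values with
  | v0 :: v1 :: _ => (some v0, some v1)
  | _ => (none, none)

-- the `for d in detections` loop with its `break`
def pickTwoLoopA (seen : PySem.Dict String (List (String × String))) :
    List (List (String × String)) → (Option (List (String × String))) × (Option (List (String × String)))
  | [] => pickTwoFinishA seen
  | d :: rest =>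
      let label := (PySem.Dict.mk d).getD "label" ""
      let seen' := if label ≠ "" ∧ seen.contains label = false then seen.insert label d else seen
      if 2 ≤ seen'.size then pickTwoFinishA seen' else pickTwoLoopA seen' rest

def pick_two_distinct_py (detections : List (List (String × String))) :
    (Option (List (String × String))) × (Option (List (String × String))) :=
  pickTwoLoopA PySem.Dict.empty detections

-- ===== PORT B =====
def pick_two_distinct_py_alt (detections : List (List (String × String))) :
    (Option (List (String × String))) × (Option (List (String × String))) :=
  -- labeled = [(d.get("label", ""), d) for d in detections]; labeled = [(l,d) for (l,d) in labeled if l]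
  let labeled0 := detections.map (fun d => ((PySem.Dict.mk d).getD "label" "", d))
  let labeled := labeled0.filter (fun p => p.1 ≠ "")
  match labeled with
  | [] => (none, none)
  | (first_label, first) :: _ =>
      -- rest = [d for (l, d) in labeled if l != first_label]
      match (labeled.filter (fun p => p.1 ≠ first_label)).map Prod.snd with
      | [] => (none, none)
      | r :: _ => (some first, some r)

-- ===== PRECONDITION & SPEC =====
def Spec_pick_two_distinct_py (detections : List (List (String × String))) (out : (Option (List (String × String))) × (Option (List (String × String)))) : Prop := out = pick_two_distinct_py_alt detections
instance (detections : List (List (String × String))) (out : (Option (List (String × String))) × (Option (List (String × String)))) : Decidable (Spec_pick_two_distinct_py detections out) := by unfold Spec_pick_two_distinct_py; infer_instance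

-- ===== CLAIM (what is proved, stated in full; the proofs are below) =====
def Claim_equal_pick_two_distinct_py : Prop := ∀ (detections : List (List (String × String))), Dom_pick_two_distinct_py detections → Spec_pick_two_distinct_py detections (pick_two_distinct_py detections)

-- ===== LEMMAS AND PROOFS =====

-- second stage of B, expressed as a function of the remaining raw detections (proof-only helper)
def pickSecond (f : List (String × String)) (fl : String)
    (l : List (List (String × String))) :
    (Option (List (String × String))) × (Option (List (String × String))) :=
  match ((l.map (fun d => ((PySem.Dict.mk d).getD "label" "", d))).filter
          (fun p => p.1 ≠ "" ∧ p.1 ≠ fl)) with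
  | [] => (none, none)
  | p :: _ => (some f, some p.2)

-- A's loop carrying the one-entry dict {fl: f} equals the staged second search
theorem loopA_single (l : List (List (String × String))) (f : List (String × String)) (fl : String) :
    pickTwoLoopA (PySem.Dict.mk [(fl, f)]) l = pickSecond f fl l := by
  induction l with
  | nil => rfl
  | cons d rest ih =>
      simp only [pickTwoLoopA, pickSecond, List.map_cons, List.filter_cons]
      by_cases hl : (PySem.Dict.mk d).getD "label" "" = ""
      · have h' : ¬ ((PySem.Dict.mk d).getD "label" "" ≠ "" ∧ (PySem.Dict.mk [(fl, f)]).contains ((PySem.Dict.mk d).getD "label" "") = false) := by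
          simp [hl]
        rw [if_neg h']
        have hsz : ¬ (2 ≤ (PySem.Dict.mk [(fl, f)]).size) := by simp [PySem.Dict.size]
        rw [if_neg hsz]
        simp only [hl]
        simpa [pickSecond] using ih
      · by_cases he : (PySem.Dict.mk d).getD "label" "" = fl
        · have h' : ¬ ((PySem.Dict.mk d).getD "label" "" ≠ "" ∧ (PySem.Dict.mk [(fl, f)]).contains ((PySem.Dict.mk d).getD "label" "") = false) := by
            simp [he, PySem.Dict.contains]
          rw [if_neg h']
          have hsz : ¬ (2 ≤ (PySem.Dict.mk [(fl, f)]).size) := by simp [PySem.Dict.size]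
          rw [if_neg hsz]
          simp only [he]
          simpa [pickSecond] using ih
        · have he' : fl ≠ (PySem.Dict.mk d).getD "label" "" := fun e => he e.symm
          have h' : ((PySem.Dict.mk d).getD "label" "" ≠ "" ∧ (PySem.Dict.mk [(fl, f)]).contains ((PySem.Dict.mk d).getD "label" "") = false) :=
            ⟨hl, by simp [PySem.Dict.contains, he']⟩
          rw [if_pos h']
          have hins : (PySem.Dict.mk [(fl, f)]).insert ((PySem.Dict.mk d).getD "label" "") d
              = PySem.Dict.mk [(fl, f), ((PySem.Dict.mk d).getD "label" "", d)] := by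
            simp [PySem.Dict.insert, PySem.Dict.contains, he']
          rw [hins]
          have hsz : (2 ≤ (PySem.Dict.mk [(fl, f), ((PySem.Dict.mk d).getD "label" "", d)]).size) := by
            simp [PySem.Dict.size]
          rw [if_pos hsz]
          simp [pickTwoFinishA, PySem.Dict.values, hl, he]

-- the second-pick filter over all of `labeled` drops its head (whose label is fl),
-- so B's body on (d :: rest) with head label fl reduces to pickSecond
theorem alt_cons_labeled (d : List (String × String)) (rest : List (List (String × String)))
    (hl : (PySem.Dict.mk d).getD "label" "" ≠ "") :
    pick_two_distinct_py_alt (d :: rest) = pickSecond d ((PySem.Dict.mk d).getD "label" "") rest := by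
  simp only [pick_two_distinct_py_alt, pickSecond, List.map_cons, List.filter_cons]
  simp only [hl, decide_not, decide_true, if_true, ne_eq, not_false_eq_true]
  have hf : ∀ L : List (String × List (String × String)),
      (L.filter (fun p => decide ¬(p.1 = ""))).filter
          (fun p => !decide (p.1 = (PySem.Dict.mk d).getD "label" ""))
        = L.filter (fun p => decide ((p.1 ≠ "") ∧ (p.1 ≠ (PySem.Dict.mk d).getD "label" ""))) := by
    intro L
    rw [List.filter_filter]
    apply List.filter_congr
    intro x _
    by_cases a : x.1 = "" <;> by_cases b : x.1 = (PySem.Dict.mk d).getD "label" "" <;> simp [a, b]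
  simp only [decide_not] at hf
  rw [List.filter_cons]
  have hhead : (!decide ((PySem.Dict.mk d).getD "label" "" = (PySem.Dict.mk d).getD "label" "")) = false := by simp
  rw [hhead]
  simp only [Bool.false_eq_true, if_false]
  rw [hf]
  rcases hL : (List.filter (fun p => !decide (p.1 = "") && !decide (p.1 = (PySem.Dict.mk d).getD "label" ""))
      (rest.map (fun d => ((PySem.Dict.mk d).getD "label" "", d)))) with _ | ⟨p, t⟩ <;> simp [hL]

-- A's loop from the empty dict equals B (induction over the detections)
theorem loopA_empty (dets : List (List (String × String))) :
    pickTwoLoopA PySem.Dict.empty dets = pick_two_distinct_py_alt dets := by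
  induction dets with
  | nil => rfl
  | cons d rest ih =>
      simp only [pickTwoLoopA]
      by_cases hl : (PySem.Dict.mk d).getD "label" "" = ""
      · have h' : ¬ ((PySem.Dict.mk d).getD "label" "" ≠ "" ∧ (PySem.Dict.empty (κ := String) (ν := List (String × String))).contains ((PySem.Dict.mk d).getD "label" "") = false) := by
          simp [hl]
        rw [if_neg h']
        have hsz : ¬ (2 ≤ (PySem.Dict.empty (κ := String) (ν := List (String × String))).size) := by
          simp [PySem.Dict.size, PySem.Dict.empty]
        rw [if_neg hsz, ih]
        simp [pick_two_distinct_py_alt, hl]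
      · have h' : ((PySem.Dict.mk d).getD "label" "" ≠ "" ∧ (PySem.Dict.empty (κ := String) (ν := List (String × String))).contains ((PySem.Dict.mk d).getD "label" "") = false) :=
          ⟨hl, by simp [PySem.Dict.contains, PySem.Dict.empty]⟩
        rw [if_pos h']
        have hins : (PySem.Dict.empty (κ := String) (ν := List (String × String))).insert ((PySem.Dict.mk d).getD "label" "") d
            = PySem.Dict.mk [((PySem.Dict.mk d).getD "label" "", d)] := rfl
        rw [hins]
        have hsz : ¬ (2 ≤ (PySem.Dict.mk [((PySem.Dict.mk d).getD "label" "", d)]).size) := by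
          simp [PySem.Dict.size]
        rw [if_neg hsz]
        rw [loopA_single, alt_cons_labeled d rest hl]

-- ===== VERDICT (by name: the statement is the Claim_ definition above) =====
theorem pick_two_distinct_py_spec : Claim_equal_pick_two_distinct_py := by
  intro dets _
  unfold Spec_pick_two_distinct_py pick_two_distinct_py
  exact loopA_empty dets
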